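-- pv_equiv track=rewrite | github.com/INMalyshev/audio-clustering | report_analyzer.py | calculate_properties
-- ===== SOURCE A (Python) =====
-- def calculate_properties(cluster_readers):
--     cluster_reader = {}
--     clusters_count = 0
--     for cluster in cluster_readers:
--         if cluster == -1:
--             continue
--         clusters_count += 1
--         max_count = 0
--         max_reader = None
--         repeats_count = 0
--         for reader in cluster_readers[cluster]:
--             if cluster_readers[cluster][reader] == max_count:
--                 repeats_count += 1
--             elif cluster_readers[cluster][reader] > max_count:
--                 repeats_count = 0
--                 max_reader = reader
--                 max_count = cluster_readers[cluster][reader]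
--         if repeats_count > 0:
--             cluster_reader[cluster] = None
--         else:
--             cluster_reader[cluster] = max_reader
--
--     total = 0
--     unrecognized = 0
--     positive = 0
--     negative = 0
--     for cluster in cluster_readers:
--         for reader in cluster_readers[cluster]:
--             file_count = cluster_readers[cluster][reader]
--
--             total += file_count
--             if cluster == -1:
--                 unrecognized += file_count
--             elif reader == cluster_reader[cluster]:
--                 positive += file_count
--             else:
--                 negative += file_count
--
--     reader_count = {}
--     undefined_clusters_count = 0
--     for cluster in cluster_reader:
--         reader = cluster_reader[cluster]
--         if reader is None:
--             undefined_clusters_count += 1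
--         else:
--             if reader not in reader_count:
--                 reader_count[reader] = 0
--             reader_count[reader] += 1
--
--     duplicate_clusters_count = 0
--     for reader in reader_count:
--         count = reader_count[reader]
--         if count > 1:
--             duplicate_clusters_count += count - 1
--
--     return {
--         "total": total, # Всего аудиофайлов
--         "unrecognized": unrecognized, # Некластеризованных аудиофайлов
--         "positive": positive, # Правильно кластеризованных аудиофайлов
--         "negative": negative, # Неправильно кластеризованных аудиофайлов
--         "clusters_count": clusters_count, # Всего кластеров
--         "undefined_clusters_count": undefined_clusters_count, # Кластеров у которых нет однозначной моды
--         "duplicate_clusters_count": duplicate_clusters_count, # Кластеров, которые должны быть частью других кластеров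
--     }
-- ===== SOURCE B (Python) =====
-- def calculate_properties(cluster_readers):
--     total = unrecognized = positive = negative = 0
--     clusters_count = undefined_clusters_count = 0
--     modes = []
--     for cluster, counts in cluster_readers.items():
--         s = sum(counts.values())
--         total += s
--         if cluster == -1:
--             unrecognized += s
--             continue
--         clusters_count += 1
--         m = max(counts.values(), default=0)
--         winners = [r for r, c in counts.items() if c == m]
--         if m > 0 and len(winners) == 1:
--             modes.append(winners[0])
--             positive += m
--             negative += s - m
--         else:
--             undefined_clusters_count += 1
--             negative += s
--     duplicate_clusters_count = len(modes) - len(set(modes))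
--     return {
--         "total": total,
--         "unrecognized": unrecognized,
--         "positive": positive,
--         "negative": negative,
--         "clusters_count": clusters_count,
--         "undefined_clusters_count": undefined_clusters_count,
--         "duplicate_clusters_count": duplicate_clusters_count,
--     }
-- ===== Notes on version B (the rewrite author's own statement) =====
-- stated objective: simpler
-- what changed: Replaces the three post-loops (online mode-tracking with max_count/max_reader/repeats_count, a separate totals pass, and the reader_count/duplicate dicts) with one pass that computes each cluster's mode in closed form (max + winners filter) and accumulates all counters at once; duplicate_clusters_count becomes len(modes) - len(set(modes)).
import Mathlib
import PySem

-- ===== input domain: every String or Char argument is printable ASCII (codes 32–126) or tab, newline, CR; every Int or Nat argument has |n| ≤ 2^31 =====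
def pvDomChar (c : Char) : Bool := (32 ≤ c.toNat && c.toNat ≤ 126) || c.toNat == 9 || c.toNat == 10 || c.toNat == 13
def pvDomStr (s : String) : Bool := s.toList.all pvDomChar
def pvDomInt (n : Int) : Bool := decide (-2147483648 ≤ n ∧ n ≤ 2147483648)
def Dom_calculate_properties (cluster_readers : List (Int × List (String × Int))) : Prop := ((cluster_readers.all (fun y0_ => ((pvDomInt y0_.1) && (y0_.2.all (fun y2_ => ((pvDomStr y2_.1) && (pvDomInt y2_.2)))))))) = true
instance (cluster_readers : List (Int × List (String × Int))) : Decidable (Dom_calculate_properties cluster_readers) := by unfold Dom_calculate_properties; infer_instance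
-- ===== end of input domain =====

-- B replaces A's online mode-tracking loop and the three follow-up passes by a single pass with a
-- closed-form per-cluster mode (max + winners filter); objective: simpler, same values, no speed claim.

-- ===== PORT A =====
-- Iterating a Python dict's keys and looking each key up yields exactly its items, so
-- 'for reader in d: ... d[reader] ...' is ported as a fold over d.items using each pair's value (exact);
-- 'cluster_reader[cluster]' is ported as getD with default none — the key is always present there.
def calculate_properties (cluster_readers : List (Int × List (String × Int))) : List (String × Int) :=
  let crd := PySem.Dict.ofList cluster_readers
  let p1 :=
    crd.items.foldl (fun (acc : PySem.Dict Int (Option String) × Int) c =>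
      if c.1 == -1 then acc
      else
        let st := (PySem.Dict.ofList c.2).items.foldl
          (fun (s : Int × Option String × Int) r =>
            if r.2 == s.1 then (s.1, s.2.1, s.2.2 + 1)
            else if r.2 > s.1 then (r.2, some r.1, 0)
            else s) (0, none, 0)
        (acc.1.insert c.1 (if st.2.2 > 0 then none else st.2.1), acc.2 + 1))
      (PySem.Dict.empty, 0)
  let cluster_reader := p1.1
  let clusters_count := p1.2
  let p2 :=
    crd.items.foldl (fun (acc : Int × Int × Int × Int) c =>
      (PySem.Dict.ofList c.2).items.foldl (fun (a : Int × Int × Int × Int) r =>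
        let fc := r.2
        if c.1 == -1 then (a.1 + fc, a.2.1 + fc, a.2.2.1, a.2.2.2)
        else if cluster_reader.getD c.1 none == some r.1 then
          (a.1 + fc, a.2.1, a.2.2.1 + fc, a.2.2.2)
        else (a.1 + fc, a.2.1, a.2.2.1, a.2.2.2 + fc)) acc) (0, 0, 0, 0)
  let p3 :=
    cluster_reader.items.foldl (fun (acc : PySem.Dict String Int × Int) q =>
      match q.2 with
      | none => (acc.1, acc.2 + 1)
      | some r => (acc.1.insert r (acc.1.getD r 0 + 1), acc.2)) (PySem.Dict.empty, 0)
  let dup := p3.1.items.foldl (fun (a : Int) q => if q.2 > 1 then a + (q.2 - 1) else a) 0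
  [("total", p2.1), ("unrecognized", p2.2.1), ("positive", p2.2.2.1), ("negative", p2.2.2.2),
   ("clusters_count", clusters_count), ("undefined_clusters_count", p3.2),
   ("duplicate_clusters_count", dup)]


-- ===== PORT B =====
def calculate_properties_alt (cluster_readers : List (Int × List (String × Int))) : List (String × Int) :=
  let crd := PySem.Dict.ofList cluster_readers
  let st := crd.items.foldl
    (fun (acc : Int × Int × Int × Int × Int × Int × List String) c =>
      let (total, unrecognized, positive, negative, cc, undef, modes) := acc
      let counts := PySem.Dict.ofList c.2
      let s := counts.values.sum
      if c.1 == -1 then (total + s, unrecognized + s, positive, negative, cc, undef, modes)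
      else
        let m := PySem.List.maxD counts.values (fun v => v) 0
        let winners := (counts.items.filter (fun p => p.2 == m)).map (·.1)
        if 0 < m ∧ winners.length = 1 then
          (total + s, unrecognized, positive + m, negative + (s - m), cc + 1, undef, modes ++ [winners.headI])
        else
          (total + s, unrecognized, positive, negative + s, cc + 1, undef + 1, modes))
    (0, 0, 0, 0, 0, 0, [])
  let (total, unrecognized, positive, negative, cc, undef, modes) := st
  [("total", total), ("unrecognized", unrecognized), ("positive", positive), ("negative", negative),
   ("clusters_count", cc), ("undefined_clusters_count", undef),
   ("duplicate_clusters_count", (modes.length : Int) - ((PySem.Set.ofList modes).length : Int))]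


-- ===== PRECONDITION & SPEC =====
def Spec_calculate_properties (cluster_readers : List (Int × List (String × Int))) (out : List (String × Int)) : Prop := out = calculate_properties_alt cluster_readers
instance (cluster_readers : List (Int × List (String × Int))) (out : List (String × Int)) : Decidable (Spec_calculate_properties cluster_readers out) := by unfold Spec_calculate_properties; infer_instance

-- ===== CLAIM (what is proved, stated in full; the proofs are below) =====
def Claim_equal_calculate_properties : Prop := ∀ (cluster_readers : List (Int × List (String × Int))), Dom_calculate_properties cluster_readers → Spec_calculate_properties cluster_readers (calculate_properties cluster_readers)

-- ===== LEMMAS AND PROOFS =====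

def pvMx (xs : List (String × Int)) : Int := xs.foldl (fun m p => max m p.2) 0
def pvCnt (xs : List (String × Int)) : Nat := xs.countP (fun p => p.2 == pvMx xs)
def pvMode (xs : List (String × Int)) : Option String :=
  if 0 < pvMx xs ∧ pvCnt xs = 1 then ((xs.find? (fun p => p.2 == pvMx xs)).map (·.1)) else none

lemma pvMx_eq_map (xs : List (String × Int)) : pvMx xs = ((xs.map (·.2)).foldl max 0) := by
  simp [pvMx, List.foldl_map]

lemma pvMx_nonneg (xs : List (String × Int)) : 0 ≤ pvMx xs := by
  rw [pvMx_eq_map]; exact (PySem.List.le_foldl_max _ _).1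

lemma pvMx_ge (xs : List (String × Int)) {p : String × Int} (hp : p ∈ xs) : p.2 ≤ pvMx xs := by
  rw [pvMx_eq_map]; exact (PySem.List.le_foldl_max _ _).2 _ (List.mem_map_of_mem hp)

lemma pvMx_append (xs : List (String × Int)) (p : String × Int) :
    pvMx (xs ++ [p]) = max (pvMx xs) p.2 := by
  simp [pvMx, List.foldl_append]

lemma pvMx_mem (xs : List (String × Int)) (h : pvMx xs ≠ 0) : ∃ p ∈ xs, p.2 = pvMx xs := by
  induction xs using List.reverseRecOn with
  | nil => simp [pvMx] at h
  | append_singleton xs p ih =>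
    rw [pvMx_append] at *
    by_cases hle : p.2 ≤ pvMx xs
    · rw [max_eq_left hle] at h ⊢
      obtain ⟨q, hq, hq2⟩ := ih h
      exact ⟨q, List.mem_append_left _ hq, hq2⟩
    · rw [max_eq_right (by omega)]
      exact ⟨p, List.mem_append_right _ (List.mem_singleton_self p), rfl⟩

lemma pvCnt_pos (xs : List (String × Int)) (h : 0 < pvMx xs) : 0 < pvCnt xs := by
  obtain ⟨p, hp, hp2⟩ := pvMx_mem xs (by omega)
  exact List.countP_pos_iff.mpr ⟨p, hp, by simp [hp2]⟩

lemma pv_find_append (xs : List (String × Int)) (p : String × Int) (h : 0 < pvMx xs) :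
    (xs ++ [p]).find? (fun q => q.2 == pvMx xs) = xs.find? (fun q => q.2 == pvMx xs) := by
  obtain ⟨q, hq, hq2⟩ := pvMx_mem xs (by omega)
  have : (xs.find? (fun q => q.2 == pvMx xs)).isSome = true :=
    List.find?_isSome.mpr ⟨q, hq, by simp [hq2]⟩
  rw [List.find?_append]
  cases hfq : xs.find? (fun q => q.2 == pvMx xs) with
  | none => rw [hfq] at this; simp at this
  | some w => simp

lemma pv_afold (xs : List (String × Int)) :
    xs.foldl (fun (s : Int × Option String × Int) r =>
        if r.2 == s.1 then (s.1, s.2.1, s.2.2 + 1)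
        else if r.2 > s.1 then (r.2, some r.1, 0)
        else s) (0, none, 0)
    = (pvMx xs,
       (if 0 < pvMx xs then (xs.find? (fun p => p.2 == pvMx xs)).map (·.1) else none),
       (if 0 < pvMx xs then ((pvCnt xs : Int) - 1) else (xs.countP (fun p => p.2 == 0) : Int))) := by
  induction xs using List.reverseRecOn with
  | nil => simp [pvMx]
  | append_singleton xs p ih =>
    rw [List.foldl_append, ih]
    have hnn := pvMx_nonneg xs
    have ha := pvMx_append xs p
    simp only [List.foldl_cons, List.foldl_nil]
    rcases lt_trichotomy p.2 (pvMx xs) with hlt | heq | hgt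
    · -- p.2 < Mx : state unchanged
      have hm : pvMx (xs ++ [p]) = pvMx xs := by omega
      have hne : (p.2 == pvMx xs) = false := by simp; omega
      simp only [hne, Bool.false_eq_true, if_false, show ¬ (p.2 > pvMx xs) by omega, if_false]
      by_cases h0 : 0 < pvMx xs
      · simp only [hm, h0, if_true, pv_find_append xs p h0, pvCnt, List.countP_append]
        simp [hne]
      · have hz : pvMx xs = 0 := by omega
        simp only [hm, h0, if_false, List.countP_append]
        simp [show (p.2 == 0) = false by simp; omega]
    · -- p.2 = Mx : repeats_count += 1
      have hm : pvMx (xs ++ [p]) = pvMx xs := by omega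
      have he : (p.2 == pvMx xs) = true := by simp [heq]
      simp only [he, if_true]
      by_cases h0 : 0 < pvMx xs
      · have hc := pvCnt_pos xs h0
        simp only [hm, h0, if_true, pv_find_append xs p h0, pvCnt, List.countP_append]
        simp [he]
      · have hz : pvMx xs = 0 := by omega
        simp only [hm, h0, if_false, List.countP_append]
        simp [show (p.2 == 0) = true by simp; omega]
    · -- p.2 > Mx : new max
      have hm : pvMx (xs ++ [p]) = p.2 := by omega
      have hne : (p.2 == pvMx xs) = false := by simp; omega
      have h0' : 0 < p.2 := by omega
      have hzero : ∀ q ∈ xs, ¬ ((fun q => q.2 == p.2) q = true) := by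
        intro q hq
        have := pvMx_ge xs hq
        simp; omega
      simp only [hne, Bool.false_eq_true, if_false, show p.2 > pvMx xs from hgt, if_true]
      simp only [hm, h0', if_true, List.find?_append, List.find?_eq_none.mpr hzero, pvCnt,
        List.countP_append, List.countP_eq_zero.mpr hzero]
      simp

lemma pv_amode (xs : List (String × Int)) :
    (if (xs.foldl (fun (s : Int × Option String × Int) r =>
        if r.2 == s.1 then (s.1, s.2.1, s.2.2 + 1)
        else if r.2 > s.1 then (r.2, some r.1, 0)
        else s) (0, none, 0)).2.2 > 0 then none
     else (xs.foldl (fun (s : Int × Option String × Int) r =>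
        if r.2 == s.1 then (s.1, s.2.1, s.2.2 + 1)
        else if r.2 > s.1 then (r.2, some r.1, 0)
        else s) (0, none, 0)).2.1) = pvMode xs := by
  rw [pv_afold]
  unfold pvMode
  by_cases h0 : 0 < pvMx xs
  · have hc := pvCnt_pos xs h0
    by_cases h1 : pvCnt xs = 1
    · simp [h0, h1]
    · have : ((pvCnt xs : Int) - 1) > 0 := by omega
      simp [h0, h1, this]
      intro hle
      omega
  · simp [h0]

def pvMaxD (xs : List (String × Int)) : Int := PySem.List.maxD (xs.map (·.2)) (fun v => v) 0

lemma pv_maxD_pos_iff (xs : List (String × Int)) : (0 < pvMaxD xs ↔ 0 < pvMx xs) := by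
  unfold pvMaxD PySem.List.maxD
  cases hm : PySem.List.max? (xs.map (·.2)) (fun v => v) with
  | none =>
    have : xs.map (·.2) = [] := (PySem.List.max?_eq_none_iff _ _).mp hm
    have hx : xs = [] := by cases xs <;> simp_all
    simp [hx, pvMx]
  | some v =>
    have hvmem := PySem.List.max?_mem hm
    have hmax := PySem.List.max?_isMax hm
    obtain ⟨p, hp, rfl⟩ := List.mem_map.mp hvmem
    have h1 : p.2 ≤ pvMx xs := pvMx_ge xs hp
    constructor
    · intro h; simp at h; omega
    · intro h
      obtain ⟨q, hq, hq2⟩ := pvMx_mem xs (by omega)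
      have := hmax _ (List.mem_map_of_mem hq)
      simp at this ⊢
      omega

lemma pv_maxD_eq (xs : List (String × Int)) (h : 0 < pvMx xs) : pvMaxD xs = pvMx xs := by
  unfold pvMaxD PySem.List.maxD
  cases hm : PySem.List.max? (xs.map (·.2)) (fun v => v) with
  | none =>
    have : xs.map (·.2) = [] := (PySem.List.max?_eq_none_iff _ _).mp hm
    have hx : xs = [] := by cases xs <;> simp_all
    simp [hx, pvMx] at h
  | some v =>
    have hvmem := PySem.List.max?_mem hm
    have hmax := PySem.List.max?_isMax hm
    obtain ⟨p, hp, rfl⟩ := List.mem_map.mp hvmem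
    have h1 : p.2 ≤ pvMx xs := pvMx_ge xs hp
    obtain ⟨q, hq, hq2⟩ := pvMx_mem xs (by omega)
    have := hmax _ (List.mem_map_of_mem hq)
    simp at this ⊢
    omega

lemma pv_gate_iff (xs : List (String × Int)) :
    ((0 < pvMaxD xs ∧ ((xs.filter (fun p => p.2 == pvMaxD xs)).map (·.1)).length = 1)
      ↔ (pvMode xs).isSome) := by
  unfold pvMode
  constructor
  · rintro ⟨h0, hlen⟩
    have hx := (pv_maxD_pos_iff xs).mp h0
    rw [pv_maxD_eq xs hx] at hlen
    have hcnt : pvCnt xs = 1 := by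
      rw [pvCnt, List.countP_eq_length_filter]
      simpa using hlen
    have hf : (xs.find? (fun p => p.2 == pvMx xs)).isSome :=
      List.find?_isSome.mpr (by
        obtain ⟨p, hp, hp2⟩ := pvMx_mem xs (by omega)
        exact ⟨p, hp, by simp [hp2]⟩)
    simp [hx, hcnt, Option.isSome_map, hf]
  · intro h
    by_cases hc : 0 < pvMx xs ∧ pvCnt xs = 1
    · have h0 := (pv_maxD_pos_iff xs).mpr hc.1
      refine ⟨h0, ?_⟩
      rw [pv_maxD_eq xs hc.1]
      have := hc.2
      rw [pvCnt, List.countP_eq_length_filter] at this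
      simpa using this
    · simp [hc] at h

lemma pv_gate_head (xs : List (String × Int))
    (h0 : 0 < pvMaxD xs)
    (hlen : ((xs.filter (fun p => p.2 == pvMaxD xs)).map (·.1)).length = 1) :
    some (((xs.filter (fun p => p.2 == pvMaxD xs)).map (·.1)).headI) = pvMode xs := by
  have hx := (pv_maxD_pos_iff xs).mp h0
  rw [pv_maxD_eq xs hx] at hlen ⊢
  have hcnt : pvCnt xs = 1 := by
    rw [pvCnt, List.countP_eq_length_filter]
    simpa using hlen
  have hflen : (xs.filter (fun p => p.2 == pvMx xs)).length = 1 := by simpa using hlen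
  obtain ⟨w, hw⟩ := List.length_eq_one_iff.mp hflen
  unfold pvMode
  rw [if_pos ⟨hx, hcnt⟩, ← List.head?_filter, hw]
  simp

lemma pv_filter_key (xs : List (String × Int)) (hnd : (xs.map (·.1)).Nodup)
    {w : String × Int} (hw : w ∈ xs) :
    xs.filter (fun p => w.1 == p.1) = [w] := by
  induction xs with
  | nil => simp at hw
  | cons x xs ih =>
    simp only [List.map_cons, List.nodup_cons] at hnd
    rcases List.mem_cons.mp hw with rfl | hmem
    · have hrest : xs.filter (fun p => w.1 == p.1) = [] := by
        rw [List.filter_eq_nil_iff]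
        intro p hp
        have : p.1 ∈ xs.map (·.1) := List.mem_map_of_mem hp
        simp
        intro hpe
        exact hnd.1 (hpe ▸ this)
      simp [hrest]
    · have hne : (w.1 == x.1) = false := by
        have : w.1 ∈ xs.map (·.1) := List.mem_map_of_mem hmem
        simp
        intro hpe
        exact hnd.1 (hpe ▸ this)
      simp only [List.filter_cons, hne]
      exact ih hnd.2 hmem

lemma pv_P_eq (xs : List (String × Int)) (hnd : (xs.map (·.1)).Nodup)
    (r0 : String) (h : pvMode xs = some r0) :
    ((xs.filter (fun p => r0 == p.1)).map (·.2)).sum = pvMx xs := by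
  unfold pvMode at h
  by_cases hc : 0 < pvMx xs ∧ pvCnt xs = 1
  · rw [if_pos hc] at h
    cases hfw : xs.find? (fun p => p.2 == pvMx xs) with
    | none => rw [hfw] at h; simp at h
    | some w =>
      rw [hfw] at h
      simp at h
      have hwmem := List.mem_of_find?_eq_some hfw
      have hwv : w.2 = pvMx xs := by
        have := List.find?_some hfw
        simpa using this
      rw [← h, pv_filter_key xs hnd hwmem]
      simpa using hwv
  · rw [if_neg hc] at h; simp at h

lemma pv_fold4 (xs : List (String × Int)) (b : Bool) (g : String → Bool) (a0 b0 c0 d0 : Int) :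
    xs.foldl (fun (a : Int × Int × Int × Int) r =>
        if b then (a.1 + r.2, a.2.1 + r.2, a.2.2.1, a.2.2.2)
        else if g r.1 then (a.1 + r.2, a.2.1, a.2.2.1 + r.2, a.2.2.2)
        else (a.1 + r.2, a.2.1, a.2.2.1, a.2.2.2 + r.2)) (a0, b0, c0, d0)
    = (a0 + ((xs.map (·.2)).sum),
       b0 + (if b then (xs.map (·.2)).sum else 0),
       c0 + (if b then 0 else ((xs.filter (fun p => g p.1)).map (·.2)).sum),
       d0 + (if b then 0 else (xs.map (·.2)).sum - ((xs.filter (fun p => g p.1)).map (·.2)).sum)) := by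
  induction xs generalizing a0 b0 c0 d0 with
  | nil => simp
  | cons r xs ih =>
    simp only [List.foldl_cons]
    cases b with
    | true => rw [if_pos rfl, ih]; simp; omega
    | false =>
      by_cases hg : g r.1
      · rw [if_neg (by simp), if_pos hg, ih]
        simp [List.filter_cons, hg]
        omega
      · rw [if_neg (by simp), if_neg hg, ih]
        simp [List.filter_cons, hg]
        omega

def pvInn (c : Int × List (String × Int)) : List (String × Int) := (PySem.Dict.ofList c.2).items
def pvS (c : Int × List (String × Int)) : Int := ((pvInn c).map (·.2)).sum
def pvModeC (c : Int × List (String × Int)) : Option String := pvMode (pvInn c)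
def pvFlt (l : List (Int × List (String × Int))) : List (Int × List (String × Int)) :=
  l.filter (fun c => !(c.1 == -1))
def pvMs (l : List (Int × List (String × Int))) : List String := (pvFlt l).filterMap pvModeC
def pvPosC (c : Int × List (String × Int)) : Int :=
  if (pvModeC c).isSome then pvMx (pvInn c) else 0
def pvT (l : List (Int × List (String × Int))) : Int := (l.map pvS).sum
def pvU (l : List (Int × List (String × Int))) : Int :=
  (l.map (fun c => if c.1 == -1 then pvS c else 0)).sum
def pvPosT (l : List (Int × List (String × Int))) : Int :=
  (l.map (fun c => if c.1 == -1 then 0 else pvPosC c)).sum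
def pvNegT (l : List (Int × List (String × Int))) : Int :=
  (l.map (fun c => if c.1 == -1 then 0 else pvS c - pvPosC c)).sum

lemma pv_phase1 (l : List (Int × List (String × Int))) (hnd : (l.map (·.1)).Nodup) :
    l.foldl (fun (acc : PySem.Dict Int (Option String) × Int) c =>
      if c.1 == -1 then acc
      else
        (acc.1.insert c.1
          (if ((PySem.Dict.ofList c.2).items.foldl
                (fun (s : Int × Option String × Int) r =>
                  if r.2 == s.1 then (s.1, s.2.1, s.2.2 + 1)
                  else if r.2 > s.1 then (r.2, some r.1, 0)
                  else s) (0, none, 0)).2.2 > 0 then none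
           else ((PySem.Dict.ofList c.2).items.foldl
                (fun (s : Int × Option String × Int) r =>
                  if r.2 == s.1 then (s.1, s.2.1, s.2.2 + 1)
                  else if r.2 > s.1 then (r.2, some r.1, 0)
                  else s) (0, none, 0)).2.1),
         acc.2 + 1)) (PySem.Dict.empty, 0)
    = (PySem.Dict.mk ((pvFlt l).map (fun c => (c.1, pvModeC c))), ((pvFlt l).length : Int)) := by
  induction l using List.reverseRecOn with
  | nil => rfl
  | append_singleton l c ih =>
    rw [List.map_append, List.nodup_append] at hnd
    obtain ⟨hnd1, -, hdisj⟩ := hnd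
    rw [List.foldl_append, ih hnd1]
    simp only [List.foldl_cons, List.foldl_nil]
    by_cases hc : (c.1 == -1) = true
    · rw [if_pos hc]
      have : pvFlt (l ++ [c]) = pvFlt l := by
        simp [pvFlt, List.filter_append, hc]
      rw [this]
    · rw [if_neg hc]
      have hflt : pvFlt (l ++ [c]) = pvFlt l ++ [c] := by
        simp [pvFlt, List.filter_append, hc]
      have hmode := pv_amode (PySem.Dict.ofList c.2).items
      rw [hmode]
      have hnotmem : c.1 ∉ (pvFlt l).map (·.1) := by
        intro hmem
        obtain ⟨q, hq, hq1⟩ := List.mem_map.mp hmem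
        have hql : q ∈ l := List.mem_of_mem_filter hq
        exact hdisj q.1 (List.mem_map_of_mem hql) c.1 (by simp) hq1
      have hcon : (PySem.Dict.mk ((pvFlt l).map (fun c => (c.1, pvModeC c)))).contains c.1 = false := by
        rw [Bool.eq_false_iff]
        intro hcon
        have := (PySem.Dict.contains_iff_mem_keys _ _).mp hcon
        simp only [PySem.Dict.keys_mk, List.map_map] at this
        apply hnotmem
        simpa [Function.comp] using this
      simp only [Prod.mk.injEq]
      refine ⟨?_, ?_⟩
      · apply PySem.Dict.ext
        rw [PySem.Dict.items_insert_of_not_contains _ _ hcon]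
        simp [hflt, pvModeC, pvInn]
      · rw [hflt]
        simp only [List.length_append, List.length_cons, List.length_nil]
        push_cast
        ring

lemma pv_phase2 (l : List (Int × List (String × Int))) (d : PySem.Dict Int (Option String))
    (hd : ∀ c ∈ l, (c.1 == -1) = false → d.getD c.1 none = pvModeC c)
    (hin : ∀ c ∈ l, ((pvInn c).map (·.1)).Nodup) :
    l.foldl (fun (acc : Int × Int × Int × Int) c =>
      (PySem.Dict.ofList c.2).items.foldl (fun (a : Int × Int × Int × Int) r =>
        if c.1 == -1 then (a.1 + r.2, a.2.1 + r.2, a.2.2.1, a.2.2.2)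
        else if d.getD c.1 none == some r.1 then (a.1 + r.2, a.2.1, a.2.2.1 + r.2, a.2.2.2)
        else (a.1 + r.2, a.2.1, a.2.2.1, a.2.2.2 + r.2)) acc) (0, 0, 0, 0)
    = (pvT l, pvU l, pvPosT l, pvNegT l) := by
  induction l using List.reverseRecOn with
  | nil => simp [pvT, pvU, pvPosT, pvNegT]
  | append_singleton l c ih =>
    have hd1 : ∀ c' ∈ l, (c'.1 == -1) = false → d.getD c'.1 none = pvModeC c' := by
      intro c' hc' h; exact hd c' (List.mem_append_left _ hc') h
    have hin1 : ∀ c' ∈ l, ((pvInn c').map (·.1)).Nodup := by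
      intro c' hc'; exact hin c' (List.mem_append_left _ hc')
    rw [List.foldl_append, ih hd1 hin1]
    simp only [List.foldl_cons, List.foldl_nil]
    rw [pv_fold4 ((PySem.Dict.ofList c.2).items) (c.1 == -1) (fun x => d.getD c.1 none == some x)]
    have hT : pvT (l ++ [c]) = pvT l + pvS c := by simp [pvT, pvS, pvInn]
    have hU : pvU (l ++ [c]) = pvU l + (if c.1 == -1 then pvS c else 0) := by simp [pvU]
    have hP : pvPosT (l ++ [c]) = pvPosT l + (if c.1 == -1 then 0 else pvPosC c) := by simp [pvPosT]
    have hN : pvNegT (l ++ [c]) = pvNegT l + (if c.1 == -1 then 0 else pvS c - pvPosC c) := by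
      simp [pvNegT]
    rw [hT, hU, hP, hN]
    by_cases hc : (c.1 == -1) = true
    · simp [hc, pvS, pvInn]
    · have hcf : (c.1 == -1) = false := by simpa using hc
      have hmo := hd c (List.mem_append_right _ (by simp)) hcf
      rw [hcf]
      simp only [Bool.false_eq_true, if_false]
      rw [hmo]
      cases hmc : pvModeC c with
      | none =>
        have hfe : ((PySem.Dict.ofList c.2).items.filter (fun p => none == some p.1)) = [] := by
          simp
        simp [hfe, pvPosC, hmc, pvS, pvInn]
      | some r0 =>
        have hsum := pv_P_eq (pvInn c) (hin c (List.mem_append_right _ (by simp))) r0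
          (by rw [← hmc]; rfl)
        have : ((PySem.Dict.ofList c.2).items.filter (fun p => some r0 == some p.1)).map (·.2)
             = ((pvInn c).filter (fun p => r0 == p.1)).map (·.2) := by
          simp [pvInn]
        simp only [this]
        rw [hsum]
        simp [pvPosC, hmc, pvS, pvInn]

lemma pv_phase3 (q : List (Int × Option String)) :
    q.foldl (fun (acc : PySem.Dict String Int × Int) p =>
      match p.2 with
      | none => (acc.1, acc.2 + 1)
      | some r => (acc.1.insert r (acc.1.getD r 0 + 1), acc.2)) (PySem.Dict.empty, (0 : Int))
    = (PySem.Dict.counter (q.filterMap (·.2)), (q.countP (fun p => p.2 == none) : Int)) := by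
  have main : ∀ (q : List (Int × Option String)),
      q.foldl (fun (acc : PySem.Dict String Int × Int) p =>
        match p.2 with
        | none => (acc.1, acc.2 + 1)
        | some r => (acc.1.insert r (acc.1.getD r 0 + 1), acc.2)) (PySem.Dict.empty, (0 : Int))
      = ((q.filterMap (·.2)).foldl (fun d x => d.insert x (d.getD x 0 + 1)) PySem.Dict.empty,
         (q.countP (fun p => p.2 == none) : Int)) := by
    intro q
    induction q using List.reverseRecOn with
    | nil => rfl
    | append_singleton q p ih =>
      rw [List.foldl_append, ih]
      simp only [List.foldl_cons, List.foldl_nil]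
      cases hp : p.2 with
      | none =>
        simp [List.filterMap_append, List.countP_append, hp]
      | some r =>
        simp [List.filterMap_append, List.countP_append, hp, List.foldl_append]
  rw [main, PySem.Dict.foldl_insert_getD_add_one_eq_counter]

lemma pv_sum_count_ofList (ms : List String) :
    ((PySem.Set.ofList ms).map (fun k => ms.count k)).sum = ms.length := by
  have hperm : (PySem.Set.ofList ms).Perm ms.dedup := by
    apply (List.perm_ext_iff_of_nodup (PySem.Set.nodup_ofList ms) ms.nodup_dedup).mpr
    intro x
    rw [PySem.Set.mem_ofList, List.mem_dedup]
  calc ((PySem.Set.ofList ms).map (fun k => ms.count k)).sum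
      = ((ms.dedup.map (fun k => ms.count k)).sum) := (hperm.map _).sum_eq
    _ = ms.length := List.sum_map_count_dedup_eq_length ms

lemma pv_phase4 (ms : List String) :
    (PySem.Dict.counter ms).items.foldl
      (fun (a : Int) q => if q.2 > 1 then a + (q.2 - 1) else a) 0
    = (ms.length : Int) - ((PySem.Set.ofList ms).length : Int) := by
  rw [PySem.Dict.items_counter, List.foldl_map]
  have step : ∀ (ks : List String) (a0 : Int), (∀ k ∈ ks, 1 ≤ ms.count k) →
      ks.foldl (fun (a : Int) k =>
        if ((ms.count k : Int)) > 1 then a + ((ms.count k : Int) - 1) else a) a0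
      = a0 + ((ks.map (fun k => (ms.count k : Int))).sum - (ks.length : Int)) := by
    intro ks
    induction ks with
    | nil => intro a0 _; simp
    | cons k ks ih =>
      intro a0 h
      have hk := h k (by simp)
      simp only [List.foldl_cons]
      by_cases h1 : ((ms.count k : Int)) > 1
      · rw [if_pos h1, ih _ (fun k hk' => h k (by simp [hk']))]
        simp only [List.map_cons, List.sum_cons, List.length_cons]
        push_cast
        ring
      · have : (ms.count k : Int) = 1 := by omega
        rw [if_neg h1, ih _ (fun k hk' => h k (by simp [hk']))]
        simp only [List.map_cons, List.sum_cons, List.length_cons, this]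
        push_cast
        ring
  have hcount : ∀ k ∈ PySem.Set.ofList ms, 1 ≤ ms.count k := by
    intro k hk
    exact List.count_pos_iff.mpr ((PySem.Set.mem_ofList _ _).mp hk)
  rw [step (PySem.Set.ofList ms) 0 hcount]
  have : ((PySem.Set.ofList ms).map (fun k => (ms.count k : Int))).sum
       = ((((PySem.Set.ofList ms).map (fun k => ms.count k)).sum : Nat) : Int) := by
    induction (PySem.Set.ofList ms) with
    | nil => simp
    | cons x xs ih => simp [ih]
  rw [this, pv_sum_count_ofList]
  ring

lemma pv_bfold (l : List (Int × List (String × Int))) :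
    l.foldl (fun (acc : Int × Int × Int × Int × Int × Int × List String) c =>
      let (total, unrecognized, positive, negative, cc, undef, modes) := acc
      let counts := PySem.Dict.ofList c.2
      let s := counts.values.sum
      if c.1 == -1 then (total + s, unrecognized + s, positive, negative, cc, undef, modes)
      else
        let m := PySem.List.maxD counts.values (fun v => v) 0
        let winners := (counts.items.filter (fun p => p.2 == m)).map (·.1)
        if 0 < m ∧ winners.length = 1 then
          (total + s, unrecognized, positive + m, negative + (s - m), cc + 1, undef, modes ++ [winners.headI])
        else
          (total + s, unrecognized, positive, negative + s, cc + 1, undef + 1, modes))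
      (0, 0, 0, 0, 0, 0, [])
    = (pvT l, pvU l, pvPosT l, pvNegT l, ((pvFlt l).length : Int),
       (((pvFlt l).countP (fun c => pvModeC c == none)) : Int), pvMs l) := by
  induction l using List.reverseRecOn with
  | nil => simp [pvT, pvU, pvPosT, pvNegT, pvFlt, pvMs]
  | append_singleton l c ih =>
    rw [List.foldl_append, ih]
    simp only [List.foldl_cons, List.foldl_nil]
    have hvals : (PySem.Dict.ofList c.2).values = (pvInn c).map (·.2) := by
      simp [PySem.Dict.values, pvInn]
    have hT : pvT (l ++ [c]) = pvT l + pvS c := by simp [pvT, pvS, pvInn]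
    have hU : pvU (l ++ [c]) = pvU l + (if c.1 == -1 then pvS c else 0) := by simp [pvU]
    have hP : pvPosT (l ++ [c]) = pvPosT l + (if c.1 == -1 then 0 else pvPosC c) := by simp [pvPosT]
    have hN : pvNegT (l ++ [c]) = pvNegT l + (if c.1 == -1 then 0 else pvS c - pvPosC c) := by
      simp [pvNegT]
    by_cases hc : (c.1 == -1) = true
    · have hflt : pvFlt (l ++ [c]) = pvFlt l := by simp [pvFlt, List.filter_append, hc]
      rw [if_pos hc, hT, hU, hP, hN]
      simp [hc, hflt, pvMs, pvS, pvInn, hvals]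
    · have hcf : (c.1 == -1) = false := by simpa using hc
      have hflt : pvFlt (l ++ [c]) = pvFlt l ++ [c] := by simp [pvFlt, List.filter_append, hc]
      rw [if_neg hc, hT, hU, hP, hN]
      have hm : PySem.List.maxD (PySem.Dict.ofList c.2).values (fun v => v) 0 = pvMaxD (pvInn c) := by
        rw [hvals]; rfl
      rw [hm]
      rw [show (PySem.Dict.ofList c.2).items = pvInn c from rfl]
      rw [show (PySem.Dict.ofList c.2).values.sum = pvS c from (by simp [pvS, pvInn, PySem.Dict.values])]
      by_cases hg : 0 < pvMaxD (pvInn c) ∧ (((pvInn c).filter (fun p => p.2 == pvMaxD (pvInn c))).map (·.1)).length = 1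
      · have hsome : (pvModeC c).isSome := by
          have := (pv_gate_iff (pvInn c)).mp hg
          simpa [pvModeC] using this
        have hhead := pv_gate_head (pvInn c) hg.1 hg.2
        have hmx := pv_maxD_eq (pvInn c) ((pv_maxD_pos_iff (pvInn c)).mp hg.1)
        rw [if_pos hg]
        have hms : pvMs (l ++ [c]) = pvMs l
            ++ [(((pvInn c).filter (fun p => p.2 == pvMaxD (pvInn c))).map (·.1)).headI] := by
          simp only [pvMs, hflt, List.filterMap_append]
          congr 1
          simp only [List.filterMap]
          cases hmc : pvModeC c with
          | none => rw [hmc] at hsome; simp at hsome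
          | some r0 =>
            have : r0 = (((pvInn c).filter (fun p => p.2 == pvMaxD (pvInn c))).map (·.1)).headI := by
              have := hhead
              rw [show pvMode (pvInn c) = pvModeC c from rfl, hmc] at this
              exact (Option.some_inj.mp this).symm
            simp [this]
        rw [hms]
        have hpos : pvPosC c = pvMaxD (pvInn c) := by
          rw [pvPosC, if_pos hsome, hmx]
        have hund : ((pvFlt (l ++ [c])).countP (fun c => pvModeC c == none) : Int)
            = ((pvFlt l).countP (fun c => pvModeC c == none) : Int) := by
          rw [hflt, List.countP_append]
          simp [Option.isSome_iff_ne_none.mp hsome]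
        rw [hflt]
        simp only [Prod.mk.injEq, List.length_append, List.countP_append]
        refine ⟨by simp [pvS, pvInn, hvals], by simp [hcf], by simp [hcf, hpos], by simp [hcf, hpos], by push_cast; simp, ?_, trivial⟩
        simp [Option.isSome_iff_ne_none.mp hsome]
      · have hnone : pvModeC c = none := by
          cases hmc : pvModeC c with
          | none => rfl
          | some r0 =>
            exfalso
            apply hg
            have : (pvModeC c).isSome := by simp [hmc]
            exact (pv_gate_iff (pvInn c)).mpr (by simpa [pvModeC] using this)
        rw [if_neg hg]
        have hms : pvMs (l ++ [c]) = pvMs l := by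
          simp [pvMs, hflt, List.filterMap_append, hnone]
        rw [hms, hflt]
        have hpos : pvPosC c = 0 := by simp [pvPosC, hnone]
        simp only [Prod.mk.injEq, List.length_append, List.countP_append]
        refine ⟨by simp [pvS, pvInn, hvals], by simp [hcf], by simp [hcf, hpos], by simp [hcf, hpos], by push_cast; simp, ?_, trivial⟩
        simp [hnone]

theorem pv_main (rl : List (Int × List (String × Int))) :
    calculate_properties rl = calculate_properties_alt rl := by
  have hnd : (((PySem.Dict.ofList rl).items).map (·.1)).Nodup := by
    have := PySem.Dict.nodup_keys_ofList rl
    simpa [PySem.Dict.keys] using this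
  have hin : ∀ c ∈ (PySem.Dict.ofList rl).items, ((pvInn c).map (·.1)).Nodup := by
    intro c _
    have := PySem.Dict.nodup_keys_ofList c.2
    simpa [PySem.Dict.keys, pvInn] using this
  have hndf : ((pvFlt ((PySem.Dict.ofList rl).items)).map
      (fun c => (c.1, pvModeC c))).map (·.1) |>.Nodup := by
    simp only [List.map_map]
    have hsub : (pvFlt ((PySem.Dict.ofList rl).items)).Sublist ((PySem.Dict.ofList rl).items) :=
      List.filter_sublist
    have := (hsub.map (·.1)).nodup hnd
    simpa [Function.comp] using this
  have hd : ∀ c ∈ (PySem.Dict.ofList rl).items, (c.1 == -1) = false →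
      (PySem.Dict.mk ((pvFlt ((PySem.Dict.ofList rl).items)).map
        (fun c => (c.1, pvModeC c)))).getD c.1 none = pvModeC c := by
    intro c hc hne
    apply PySem.Dict.getD_of_mem_items
    · exact List.mem_map_of_mem (List.mem_filter_of_mem hc (by simp [hne]))
    · simpa [PySem.Dict.keys] using hndf
  simp only [calculate_properties, calculate_properties_alt]
  rw [pv_phase1 _ hnd]
  rw [pv_bfold]
  rw [pv_phase2 _ _ hd hin]
  rw [pv_phase3]
  simp only [List.filterMap_map, List.countP_map]
  rw [pv_phase4]
  simp [pvMs, Function.comp]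
  rfl

-- ===== VERDICT (by name: the statement is the Claim_ definition above) =====
theorem calculate_properties_spec : Claim_equal_calculate_properties := by
  intro cluster_readers _
  exact pv_main cluster_readers
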